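-- pv_equiv track=rewrite | github.com/HMC-MIR/agentic_choral_arrangement | util/harmonization_metrics.py | _parallel_fifth_octave
-- ===== SOURCE A (Python) =====
-- def _parallel_fifth_octave(chords: list[list[int]]) -> int:
--     """Detect parallel P5 / P8 between consecutive chords using a positional
--     pseudo-voice heuristic.
--
--     For each chord pair, sort pitches ascending. For each adjacent pair of
--     pseudo-voices (position i and i+1) within a chord, measure the harmonic
--     interval. If the *same* P5 (7 semitones) or P8 (12 semitones) interval
--     appears at the same positional pair in two consecutive chords, count it
--     as a parallel-motion violation.
--     """
--     n = 0
--     for i in range(len(chords) - 1):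
--         cur = sorted(chords[i])
--         nxt = sorted(chords[i + 1])
--         common_positions = min(len(cur), len(nxt)) - 1
--         for j in range(common_positions):
--             iv_cur = cur[j + 1] - cur[j]
--             iv_nxt = nxt[j + 1] - nxt[j]
--             if iv_cur == iv_nxt and iv_cur in (7, 12):
--                 n += 1
--     return n
-- ===== SOURCE B (Python) =====
-- def _parallel_fifth_octave(chords: list[list[int]]) -> int:
--     """Count parallel P5/P8 violations by lockstep recursion over pseudo-voices.
--
--     Parallel motion is recognised via equal voice DISPLACEMENT: pseudo-voices j
--     and j+1 move in parallel iff nxt[j] - cur[j] == nxt[j+1] - cur[j+1], which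
--     is equivalent to the two harmonic intervals being equal.
--     """
--     def voice_pairs(u: list[int], v: list[int]) -> int:
--         # u, v sorted; recurse in lockstep, one pseudo-voice at a time
--         if len(u) < 2 or len(v) < 2:
--             return 0
--         here = 1 if (v[0] - u[0] == v[1] - u[1] and u[1] - u[0] in (7, 12)) else 0
--         return here + voice_pairs(u[1:], v[1:])
--
--     def walk(rest: list[list[int]]) -> int:
--         if len(rest) < 2:
--             return 0
--         return voice_pairs(sorted(rest[0]), sorted(rest[1])) + walk(rest[1:])
--
--     return walk(chords)
-- ===== Notes on version B (the rewrite author's own statement) =====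
-- stated objective: alternative
-- what changed: B replaces A's index-driven nested range loops over interval vectors with structural lockstep recursion over the two sorted chords, detecting parallel motion via equal voice displacement (nxt[j]-cur[j] == nxt[j+1]-cur[j+1]) instead of comparing the two harmonic intervals directly.
import Mathlib
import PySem

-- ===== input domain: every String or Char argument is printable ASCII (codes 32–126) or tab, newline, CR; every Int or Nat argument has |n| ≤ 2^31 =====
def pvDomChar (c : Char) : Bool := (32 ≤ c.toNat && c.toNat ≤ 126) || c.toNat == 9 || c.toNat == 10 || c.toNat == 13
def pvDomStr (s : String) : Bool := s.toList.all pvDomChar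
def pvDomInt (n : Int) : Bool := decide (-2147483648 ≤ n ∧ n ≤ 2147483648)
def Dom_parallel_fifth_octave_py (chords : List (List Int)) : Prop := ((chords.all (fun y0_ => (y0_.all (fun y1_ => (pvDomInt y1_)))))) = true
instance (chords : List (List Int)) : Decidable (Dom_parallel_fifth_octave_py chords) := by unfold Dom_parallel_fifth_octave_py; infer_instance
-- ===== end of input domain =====

-- B replaces A's index-driven nested loops with lockstep structural recursion over the
-- two sorted chords, detecting parallel motion as equal voice displacement (alternative).

-- ===== PORT A =====
def parallel_fifth_octave_py (chords : List (List Int)) : Int :=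
  (PySem.List.pyRange 0 ((chords.length : Int) - 1) 1).foldl (fun n i =>
    let cur := PySem.List.sorted (PySem.List.pyGetD chords i []) (fun x => x) false
    let nxt := PySem.List.sorted (PySem.List.pyGetD chords (i + 1) []) (fun x => x) false
    let common_positions : Int := min (cur.length : Int) (nxt.length : Int) - 1
    (PySem.List.pyRange 0 common_positions 1).foldl (fun n j =>
      let iv_cur := PySem.List.pyGetD cur (j + 1) 0 - PySem.List.pyGetD cur j 0
      let iv_nxt := PySem.List.pyGetD nxt (j + 1) 0 - PySem.List.pyGetD nxt j 0
      if iv_cur = iv_nxt ∧ (iv_cur = 7 ∨ iv_cur = 12) then n + 1 else n) n) 0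

-- ===== PORT B =====
def pvVoicePairs : List Int → List Int → Int
  | a :: b :: u, c :: d :: v =>
      (if c - a = d - b ∧ (b - a = 7 ∨ b - a = 12) then 1 else 0) + pvVoicePairs (b :: u) (d :: v)
  | _, _ => 0

def pvWalk : List (List Int) → Int
  | x :: y :: rest =>
      pvVoicePairs (PySem.List.sorted x (fun t => t) false) (PySem.List.sorted y (fun t => t) false)
        + pvWalk (y :: rest)
  | _ => 0

def parallel_fifth_octave_py_alt (chords : List (List Int)) : Int := pvWalk chords

-- ===== PRECONDITION & SPEC =====
def Spec_parallel_fifth_octave_py (chords : List (List Int)) (out : Int) : Prop := out = parallel_fifth_octave_py_alt chords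
instance (chords : List (List Int)) (out : Int) : Decidable (Spec_parallel_fifth_octave_py chords out) := by unfold Spec_parallel_fifth_octave_py; infer_instance

-- ===== CLAIM (what is proved, stated in full; the proofs are below) =====
def Claim_equal_parallel_fifth_octave_py : Prop := ∀ (chords : List (List Int)), Dom_parallel_fifth_octave_py chords → Spec_parallel_fifth_octave_py chords (parallel_fifth_octave_py chords)

-- ===== LEMMAS AND PROOFS =====

theorem pv_inner : ∀ (u v : List Int) (acc : Int),
    (List.range (min u.length v.length - 1)).foldl (fun n j =>
      if (u.getD (j + 1) 0 - u.getD j 0 = v.getD (j + 1) 0 - v.getD j 0 ∧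
          (u.getD (j + 1) 0 - u.getD j 0 = 7 ∨ u.getD (j + 1) 0 - u.getD j 0 = 12))
      then n + 1 else n) acc
    = acc + pvVoicePairs u v
  | [], v, acc => by simp [pvVoicePairs]
  | [x], v, acc => by simp [pvVoicePairs]
  | a :: b :: u', [], acc => by simp [pvVoicePairs]
  | a :: b :: u', [c], acc => by simp [pvVoicePairs]
  | a :: b :: u', c :: d :: v', acc => by
    have ih := pv_inner (b :: u') (d :: v')
        (if (b - a = d - c ∧ (b - a = 7 ∨ b - a = 12)) then acc + 1 else acc)
    simp only [List.getD_cons_succ] at ih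
    simp only [List.length_cons]
    have hmin : min (u'.length + 1 + 1) (v'.length + 1 + 1) - 1
        = (min (u'.length + 1) (v'.length + 1) - 1) + 1 := by omega
    rw [hmin, List.range_succ_eq_map, List.foldl_cons, List.foldl_map]
    simp only [List.getD_cons_zero, List.getD_cons_succ]
    simp only [List.length_cons] at ih
    rw [ih]
    show _ = acc + pvVoicePairs (a :: b :: u') (c :: d :: v')
    rw [pvVoicePairs]
    have hiff : (b - a = d - c ∧ (b - a = 7 ∨ b - a = 12))
        ↔ (c - a = d - b ∧ (b - a = 7 ∨ b - a = 12)) := by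
      constructor <;> rintro ⟨h1, h2⟩ <;> exact ⟨by omega, h2⟩
    by_cases h : (b - a = d - c ∧ (b - a = 7 ∨ b - a = 12))
    · have h2' : d - c = 7 ∨ d - c = 12 := by rcases h with ⟨h1, h2⟩; omega
      simp [h, hiff.mp h, h2']; ring
    · simp [h, hiff.not.mp h]

theorem pv_outer (g : List Int → List Int → Int)
    (hg : ∀ x y, g x y = pvVoicePairs (PySem.List.sorted x (fun t => t) false)
                                      (PySem.List.sorted y (fun t => t) false)) :
    ∀ (xs : List (List Int)) (a : Int),
    (List.range (xs.length - 1)).foldl (fun acc k => acc + g (xs.getD k []) (xs.getD (k + 1) [])) a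
    = a + pvWalk xs
  | [], a => by simp [pvWalk]
  | [x], a => by simp [pvWalk]
  | x :: y :: r, a => by
    have ih := pv_outer g hg (y :: r) (a + g x y)
    simp only [List.length_cons, Nat.add_sub_cancel] at ih ⊢
    simp only [List.getD_cons_succ] at ih
    rw [List.range_succ_eq_map, List.foldl_cons, List.foldl_map]
    simp only [List.getD_cons_zero, List.getD_cons_succ]
    rw [ih, pvWalk, hg]
    ring

theorem pv_main (chords : List (List Int)) :
    parallel_fifth_octave_py chords = parallel_fifth_octave_py_alt chords := by
  have h1 : parallel_fifth_octave_py chords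
      = (List.range (chords.length - 1)).foldl
          (fun n k => n + pvVoicePairs
              (PySem.List.sorted (chords.getD k []) (fun t => t) false)
              (PySem.List.sorted (chords.getD (k + 1) []) (fun t => t) false)) 0 := by
    unfold parallel_fifth_octave_py
    rw [PySem.List.pyRange_one]
    have ht : (((chords.length : Int) - 1) - 0).toNat = chords.length - 1 := by omega
    rw [ht, List.foldl_map]
    congr 1
    funext n k
    simp only [zero_add, ← Nat.cast_add_one, PySem.List.pyGetD_natCast]
    rw [PySem.List.pyRange_one]
    set cur := PySem.List.sorted (chords.getD k []) (fun x => x) false with hc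
    set nxt := PySem.List.sorted (chords.getD (k + 1) []) (fun x => x) false with hn
    have h2 : ((min (cur.length : Int) (nxt.length : Int) - 1) - 0).toNat
        = min cur.length nxt.length - 1 := by omega
    rw [h2, List.foldl_map]
    have hfun : (fun (m : Int) (j : Nat) =>
        (fun (m : Int) (jj : Int) =>
          if (PySem.List.pyGetD cur (jj + 1) 0 - PySem.List.pyGetD cur jj 0
              = PySem.List.pyGetD nxt (jj + 1) 0 - PySem.List.pyGetD nxt jj 0 ∧
              (PySem.List.pyGetD cur (jj + 1) 0 - PySem.List.pyGetD cur jj 0 = 7 ∨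
               PySem.List.pyGetD cur (jj + 1) 0 - PySem.List.pyGetD cur jj 0 = 12))
          then m + 1 else m) m ((0 : Int) + (j : Int)))
        = (fun (m : Int) (j : Nat) =>
          if (cur.getD (j + 1) 0 - cur.getD j 0 = nxt.getD (j + 1) 0 - nxt.getD j 0 ∧
              (cur.getD (j + 1) 0 - cur.getD j 0 = 7 ∨ cur.getD (j + 1) 0 - cur.getD j 0 = 12))
          then m + 1 else m) := by
      funext m j
      simp only [zero_add, ← Nat.cast_add_one, PySem.List.pyGetD_natCast]
    rw [hfun, pv_inner]
  rw [h1, pv_outer _ (fun _ _ => rfl) chords 0]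
  simp [parallel_fifth_octave_py_alt]

-- ===== VERDICT (by name: the statement is the Claim_ definition above) =====
theorem parallel_fifth_octave_py_spec : Claim_equal_parallel_fifth_octave_py := by
  intro chords _
  unfold Spec_parallel_fifth_octave_py
  exact pv_main chords
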